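-- pv_equiv track=rewrite | github.com/Symbolk/AlgInPy | search/365water-and-jug-problem.py | canMeasureWater2
-- ===== SOURCE A (Python) =====
-- def canMeasureWater2(x: int, y: int, z: int) -> bool:
--     if z < 0 or x + y < z:
--         return False
--     from collections import deque
--     q = deque([(0, 0)])
--     visited = {(0, 0)}
--
--     while q:
--         a, b = q.popleft()
--         if a == z or b == z or a + b == z:
--             return True
--         next_states = [
--             (0, b), (a, 0),  # drop a or b
--             (x, b), (a, y),  # fill x or y
--             (0, a + b) if a + b < y else (a + b - y, y),  # a -> b
--             (a + b, 0) if a + b < x else (x, a + b - x)  # b -> a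
--         ]
--         for state in next_states:
--             if state not in visited:
--                 q.append(state)
--                 visited.add(state)
--     return False
-- ===== SOURCE B (Python) =====
-- from math import gcd
--
--
-- def canMeasureWater2(x: int, y: int, z: int) -> bool:
--     g = gcd(x, y)
--     return 0 <= z <= x + y and (z == 0 if g == 0 else z % g == 0)
-- ===== Notes on version B (the rewrite author's own statement) =====
-- stated objective: faster
-- what changed: Replaced the O(x*y) breadth-first search over jug states by the Bezout/gcd closed form: z is measurable iff 0 <= z <= x+y and gcd(x,y) divides z (z == 0 when both jugs are empty-capacity).
-- outside the precondition, e.g. on canMeasureWater2(-2, 6, 2): A returns True, B returns True; on canMeasureWater2(-4, 6, 1): A does not finish within the time limit, B returns False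
import Mathlib
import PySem

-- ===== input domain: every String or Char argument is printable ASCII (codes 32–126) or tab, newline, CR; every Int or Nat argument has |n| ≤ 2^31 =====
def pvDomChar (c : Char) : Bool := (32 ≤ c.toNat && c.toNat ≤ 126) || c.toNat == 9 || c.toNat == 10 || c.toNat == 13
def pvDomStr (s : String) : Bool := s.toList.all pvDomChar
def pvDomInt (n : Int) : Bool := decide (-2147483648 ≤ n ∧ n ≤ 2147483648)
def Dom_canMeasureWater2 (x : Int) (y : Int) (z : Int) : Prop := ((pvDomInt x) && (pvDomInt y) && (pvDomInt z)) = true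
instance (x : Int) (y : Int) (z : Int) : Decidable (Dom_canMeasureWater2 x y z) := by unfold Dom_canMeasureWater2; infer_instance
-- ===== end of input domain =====

-- B replaces A's O(x*y)-state breadth-first search by the Bézout/gcd closed form (objective: faster).

-- ===== PORT A =====
-- Python's next_states list for the popped state (a, b)
def pvNxt (x : Int) (y : Int) (s : Int × Int) : List (Int × Int) :=
  [(0, s.2), (s.1, 0), (x, s.2), (s.1, y),
   if s.1 + s.2 < y then (0, s.1 + s.2) else (s.1 + s.2 - y, y),
   if s.1 + s.2 < x then (s.1 + s.2, 0) else (x, s.1 + s.2 - x)]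

-- Python's inner 'for state in next_states' loop body: append to queue and visited if unseen
def pvPush (acc : List (Int × Int) × PySem.Set (Int × Int)) (s : Int × Int) :
    List (Int × Int) × PySem.Set (Int × Int) :=
  if s ∈ acc.2 then acc else (acc.1 ++ [s], PySem.Set.add acc.2 s)

-- Python's 'while q' loop; the fuel argument only makes the recursion structural: under
-- Pre_ the proofs below show the loop empties the queue strictly before the fuel runs out.
def pvBfs (x : Int) (y : Int) (z : Int) : Nat → List (Int × Int) → PySem.Set (Int × Int) → Bool
  | 0, _, _ => false
  | Nat.succ fuel, q, visited =>
    match q with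
    | [] => false
    | (a, b) :: rest =>
      if a = z ∨ b = z ∨ a + b = z then true
      else
        let p := (pvNxt x y (a, b)).foldl pvPush (rest, visited)
        pvBfs x y z fuel p.1 p.2

def canMeasureWater2 (x : Int) (y : Int) (z : Int) : Bool :=
  if z < 0 ∨ x + y < z then false
  else pvBfs x y z (((x + 1) * (y + 1)).toNat + 1) [(0, 0)] (PySem.Set.ofList [(0, 0)])

-- ===== PORT B =====
def canMeasureWater2_alt (x : Int) (y : Int) (z : Int) : Bool :=
  let g : Int := Int.gcd x y
  decide (0 ≤ z) && decide (z ≤ x + y) &&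
    (if g = 0 then decide (z = 0) else decide (PySem.Int.mod z g = 0))

-- ===== PRECONDITION & SPEC =====
-- Pre_ excludes inputs with a negative jug capacity that pass A's initial guard (0 ≤ z ≤ x+y):
-- on part of that region A's BFS never terminates (e.g. (-4, 6, 1)); nothing is claimed there.
def Pre_canMeasureWater2 (x : Int) (y : Int) (z : Int) : Prop :=
  (0 ≤ x ∧ 0 ≤ y) ∨ z < 0 ∨ x + y < z
instance (x : Int) (y : Int) (z : Int) : Decidable (Pre_canMeasureWater2 x y z) := by
  unfold Pre_canMeasureWater2; infer_instance

def pvWitness_canMeasureWater2 : Int × Int × Int := (3, 5, 4)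

def Spec_canMeasureWater2 (x : Int) (y : Int) (z : Int) (out : Bool) : Prop := out = canMeasureWater2_alt x y z
instance (x : Int) (y : Int) (z : Int) (out : Bool) : Decidable (Spec_canMeasureWater2 x y z out) := by unfold Spec_canMeasureWater2; infer_instance

-- ===== CLAIM (what is proved, stated in full; the proofs are below) =====
def Claim_equal_canMeasureWater2 : Prop := ∀ (x : Int) (y : Int) (z : Int), Dom_canMeasureWater2 x y z → Pre_canMeasureWater2 x y z → Spec_canMeasureWater2 x y z (canMeasureWater2 x y z)

-- ===== LEMMAS AND PROOFS =====

-- the states reachable by Python's BFS transitions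
inductive pvReach (x : Int) (y : Int) : Int × Int → Prop
  | init : pvReach x y (0, 0)
  | step {s t : Int × Int} : pvReach x y s → t ∈ pvNxt x y s → pvReach x y t

def pvGoal (z : Int) (s : Int × Int) : Prop := s.1 = z ∨ s.2 = z ∨ s.1 + s.2 = z

def pvS (x : Int) (y : Int) : Finset (Int × Int) :=
  (Finset.range (x.toNat + 1) ×ˢ Finset.range (y.toNat + 1)).image
    (fun p => ((p.1 : Int), (p.2 : Int)))

def pvSlack (x : Int) (y : Int) (vis : PySem.Set (Int × Int)) : Nat :=
  ((pvS x y).filter (fun t => ¬ t ∈ vis)).card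

lemma pvS_mem {x y : Int} {t : Int × Int} (hx : 0 ≤ x) (hy : 0 ≤ y) :
    t ∈ pvS x y ↔ (0 ≤ t.1 ∧ t.1 ≤ x) ∧ (0 ≤ t.2 ∧ t.2 ≤ y) := by
  simp only [pvS, Finset.mem_image, Finset.mem_product, Finset.mem_range, Prod.ext_iff]
  constructor
  · rintro ⟨⟨a, b⟩, ⟨ha, hb⟩, h1, h2⟩
    simp only at h1 h2
    omega
  · rintro ⟨⟨h1, h2⟩, h3, h4⟩
    exact ⟨(t.1.toNat, t.2.toNat), by constructor <;> simp <;> omega⟩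

lemma pvNxt_mem_S {x y : Int} (hx : 0 ≤ x) (hy : 0 ≤ y) {s t : Int × Int}
    (hs : s ∈ pvS x y) (ht : t ∈ pvNxt x y s) : t ∈ pvS x y := by
  rw [pvS_mem hx hy] at hs ⊢
  simp only [pvNxt, List.mem_cons, List.not_mem_nil, or_false] at ht
  split_ifs at ht <;>
    (rcases ht with h | h | h | h | h | h <;> subst h <;> simp_all <;> omega)

-- fold facts about the inner for-loop
lemma pvPush_mono_vis : ∀ (ns : List (Int × Int)) (acc) (t : Int × Int),
    t ∈ acc.2 → t ∈ (ns.foldl pvPush acc).2 := by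
  intro ns
  induction ns with
  | nil => intro acc t h; exact h
  | cons s ns ih =>
    intro acc t h
    simp only [List.foldl_cons]
    apply ih
    unfold pvPush
    split
    · exact h
    · exact (PySem.Set.mem_add _ _ _).mpr (Or.inl h)

lemma pvPush_vis_sub : ∀ (ns : List (Int × Int)) (acc) (t : Int × Int),
    t ∈ (ns.foldl pvPush acc).2 → t ∈ acc.2 ∨ t ∈ ns := by
  intro ns
  induction ns with
  | nil => intro acc t h; exact Or.inl h
  | cons s ns ih =>
    intro acc t h
    simp only [List.foldl_cons] at h
    rcases ih _ _ h with h' | h'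
    · unfold pvPush at h'
      split at h'
      · exact Or.inl h'
      · rcases (PySem.Set.mem_add _ _ _).mp h' with h'' | h''
        · exact Or.inl h''
        · exact Or.inr (by simp [h''])
    · exact Or.inr (List.mem_cons_of_mem _ h')

lemma pvPush_ns_vis : ∀ (ns : List (Int × Int)) (acc) (t : Int × Int),
    t ∈ ns → t ∈ (ns.foldl pvPush acc).2 := by
  intro ns
  induction ns with
  | nil => intro acc t h; cases h
  | cons s ns ih =>
    intro acc t h
    rcases List.mem_cons.mp h with h' | h'
    · subst h'
      simp only [List.foldl_cons]
      apply pvPush_mono_vis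
      unfold pvPush
      split
      · assumption
      · exact (PySem.Set.mem_add _ _ _).mpr (Or.inr rfl)
    · exact ih _ _ h'

lemma pvPush_mono_q : ∀ (ns : List (Int × Int)) (acc) (t : Int × Int),
    t ∈ acc.1 → t ∈ (ns.foldl pvPush acc).1 := by
  intro ns
  induction ns with
  | nil => intro acc t h; exact h
  | cons s ns ih =>
    intro acc t h
    simp only [List.foldl_cons]
    apply ih
    unfold pvPush
    split
    · exact h
    · exact List.mem_append_left _ h

lemma pvPush_q_sub : ∀ (ns : List (Int × Int)) (acc) (t : Int × Int),
    t ∈ (ns.foldl pvPush acc).1 → t ∈ acc.1 ∨ t ∈ ns := by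
  intro ns
  induction ns with
  | nil => intro acc t h; exact Or.inl h
  | cons s ns ih =>
    intro acc t h
    simp only [List.foldl_cons] at h
    rcases ih _ _ h with h' | h'
    · unfold pvPush at h'
      split at h'
      · exact Or.inl h'
      · rcases List.mem_append.mp h' with h'' | h''
        · exact Or.inl h''
        · simp at h''
          exact Or.inr (by simp [h''])
    · exact Or.inr (List.mem_cons_of_mem _ h')

lemma pvPush_ns_q : ∀ (ns : List (Int × Int)) (acc) (t : Int × Int),
    t ∈ ns → t ∈ acc.2 ∨ t ∈ (ns.foldl pvPush acc).1 := by
  intro ns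
  induction ns with
  | nil => intro acc t h; cases h
  | cons s ns ih =>
    intro acc t h
    rcases List.mem_cons.mp h with h' | h'
    · subst h'
      by_cases hv : t ∈ acc.2
      · exact Or.inl hv
      · right
        simp only [List.foldl_cons]
        apply pvPush_mono_q
        simp only [pvPush, if_neg hv]
        exact List.mem_append_right _ (by simp)
    · rcases ih (pvPush acc s) t h' with h'' | h''
      · by_cases hv : s ∈ acc.2
        · simp only [pvPush, if_pos hv] at h''
          exact Or.inl h''
        · simp only [pvPush, if_neg hv] at h''
          rcases (PySem.Set.mem_add _ _ _).mp h'' with h3 | h3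
          · exact Or.inl h3
          · right
            simp only [List.foldl_cons]
            apply pvPush_mono_q
            simp only [pvPush, if_neg hv]
            exact List.mem_append_right _ (by simp [h3])
      · exact Or.inr h''

lemma pvSlack_add {x y : Int} {vis : PySem.Set (Int × Int)} {s : Int × Int}
    (hS : s ∈ pvS x y) (hv : ¬ s ∈ vis) :
    pvSlack x y (PySem.Set.add vis s) + 1 = pvSlack x y vis := by
  unfold pvSlack
  have hfil : (pvS x y).filter (fun t => ¬ t ∈ PySem.Set.add vis s)
      = ((pvS x y).filter (fun t => ¬ t ∈ vis)).erase s := by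
    ext t
    simp only [Finset.mem_erase, Finset.mem_filter, PySem.Set.mem_add]
    constructor
    · rintro ⟨htS, hmem⟩
      push Not at hmem
      exact ⟨hmem.2, htS, hmem.1⟩
    · rintro ⟨hne, htS, hnv⟩
      exact ⟨htS, by push Not; exact ⟨hnv, hne⟩⟩
  rw [hfil, Finset.card_erase_of_mem (by simp [Finset.mem_filter, hS, hv])]
  have : 0 < ((pvS x y).filter (fun t => ¬ t ∈ vis)).card :=
    Finset.card_pos.mpr ⟨s, by simp [Finset.mem_filter, hS, hv]⟩
  omega

lemma pvPush_measure {x y : Int} : ∀ (ns : List (Int × Int)) (acc),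
    (∀ t ∈ ns, t ∈ pvS x y) →
    (ns.foldl pvPush acc).1.length + pvSlack x y (ns.foldl pvPush acc).2
      = acc.1.length + pvSlack x y acc.2 := by
  intro ns
  induction ns with
  | nil => intro acc _; rfl
  | cons s ns ih =>
    intro acc hns
    simp only [List.foldl_cons]
    rw [ih _ (fun t ht => hns t (List.mem_cons_of_mem _ ht))]
    unfold pvPush
    split
    · rfl
    · simp only [List.length_append, List.length_singleton]
      have := pvSlack_add (x := x) (y := y) (vis := acc.2) (s := s)
        (hns s (List.mem_cons_self ..)) (by assumption)
      omega

-- soundness: a 'True' answer exhibits a reachable goal state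
lemma pvBfs_true {x y z : Int} : ∀ (fuel : Nat) (q : List (Int × Int)) vis,
    (∀ s ∈ q, pvReach x y s) → pvBfs x y z fuel q vis = true →
    ∃ s, pvReach x y s ∧ pvGoal z s := by
  intro fuel
  induction fuel with
  | zero => intro q vis _ h; simp [pvBfs] at h
  | succ fuel ih =>
    intro q vis hq h
    match q with
    | [] => simp [pvBfs] at h
    | (a, b) :: rest =>
      rw [pvBfs] at h
      split at h
      · exact ⟨(a, b), hq _ (List.mem_cons_self ..), by assumption⟩
      · refine ih _ _ ?_ h
        intro s hs
        rcases pvPush_q_sub _ _ _ hs with h' | h'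
        · exact hq _ (List.mem_cons_of_mem _ h')
        · exact pvReach.step (hq _ (List.mem_cons_self ..)) h'

-- a visited set that contains the start, is transition-closed and goal-free refutes every goal
lemma pvClosed_no_goal {x y z : Int} {vis : PySem.Set (Int × Int)}
    (h0 : (0, 0) ∈ vis)
    (hcl : ∀ s ∈ vis, ¬ pvGoal z s ∧ ∀ t ∈ pvNxt x y s, t ∈ vis) :
    ∀ t, pvReach x y t → ¬ pvGoal z t := by
  have hmem : ∀ u, pvReach x y u → u ∈ vis := by
    intro u hu
    induction hu with
    | init => exact h0
    | step _ hm ih => exact (hcl _ ih).2 _ hm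
  exact fun t ht hg => (hcl _ (hmem _ ht)).1 hg

-- completeness: a 'False' answer (with sufficient fuel and the BFS invariants) means
-- no reachable state is a goal state
lemma pvBfs_false {x y z : Int} (hx : 0 ≤ x) (hy : 0 ≤ y) :
    ∀ (fuel : Nat) (q : List (Int × Int)) vis,
    q.length + pvSlack x y vis ≤ fuel →
    (0, 0) ∈ vis →
    (∀ s ∈ q, s ∈ vis) →
    (∀ s ∈ vis, s ∈ pvS x y) →
    (∀ s ∈ vis, s ∉ q → ¬ pvGoal z s ∧ ∀ t ∈ pvNxt x y s, t ∈ vis) →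
    pvBfs x y z fuel q vis = false →
    ∀ t, pvReach x y t → ¬ pvGoal z t := by
  intro fuel
  induction fuel with
  | zero =>
    intro q vis hfuel h0 hq hvS hproc _
    have hqnil : q = [] := by
      cases q with
      | nil => rfl
      | cons a r => simp at hfuel
    subst hqnil
    exact pvClosed_no_goal h0 (fun s hs => hproc s hs (by simp))
  | succ fuel ih =>
    intro q vis hfuel h0 hq hvS hproc hres
    match q with
    | [] => exact pvClosed_no_goal h0 (fun s hs => hproc s hs (by simp))
    | (a, b) :: rest =>
      simp only [pvBfs] at hres
      split at hres
      · simp at hres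
      · rename_i hgoal
        have hsab : (a, b) ∈ pvS x y := hvS _ (hq _ (List.mem_cons_self ..))
        have hnsS : ∀ u ∈ pvNxt x y (a, b), u ∈ pvS x y :=
          fun u hu => pvNxt_mem_S hx hy hsab hu
        refine ih _ _ ?_ ?_ ?_ ?_ ?_ hres
        · rw [pvPush_measure (x := x) (y := y) (pvNxt x y (a, b)) (rest, vis) hnsS]
          simp only [List.length_cons] at hfuel
          show rest.length + pvSlack x y vis ≤ fuel
          omega
        · exact pvPush_mono_vis _ _ _ h0
        · intro s hs
          rcases pvPush_q_sub _ _ _ hs with h' | h'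
          · exact pvPush_mono_vis _ _ _ (hq _ (List.mem_cons_of_mem _ h'))
          · exact pvPush_ns_vis _ _ _ h'
        · intro s hs
          rcases pvPush_vis_sub _ _ _ hs with h' | h'
          · exact hvS _ h'
          · exact hnsS _ h'
        · intro s hs hnq
          have hsvis : s ∈ vis := by
            rcases pvPush_vis_sub _ _ _ hs with h' | h'
            · exact h'
            · by_cases hv : s ∈ vis
              · exact hv
              · rcases pvPush_ns_q _ (rest, vis) _ h' with h'' | h''
                · exact absurd h'' hv
                · exact absurd h'' hnq
          by_cases hqold : s ∈ (a, b) :: rest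
          · rcases List.mem_cons.mp hqold with h' | h'
            · subst h'
              exact ⟨by simpa [pvGoal] using hgoal,
                     fun u hu => pvPush_ns_vis _ _ _ hu⟩
            · exact absurd (pvPush_mono_q _ _ _ h') hnq
          · have hold := hproc s hsvis hqold
            exact ⟨hold.1, fun u hu => pvPush_mono_vis _ _ _ (hold.2 u hu)⟩

-- every reachable state is within bounds and both jugs hold multiples of gcd(x,y)
lemma pvReach_inv {x y : Int} (hx : 0 ≤ x) (hy : 0 ≤ y) {s : Int × Int}
    (h : pvReach x y s) :
    s ∈ pvS x y ∧ (↑(Int.gcd x y) ∣ s.1) ∧ (↑(Int.gcd x y) ∣ s.2) := by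
  induction h with
  | init =>
    exact ⟨(pvS_mem hx hy).mpr (by simp [hx, hy]), dvd_zero _, dvd_zero _⟩
  | step hs hmem ih =>
    obtain ⟨hS, hda, hdb⟩ := ih
    have hgx : (↑(Int.gcd x y) : Int) ∣ x := Int.gcd_dvd_left _ _
    have hgy : (↑(Int.gcd x y) : Int) ∣ y := Int.gcd_dvd_right _ _
    refine ⟨pvNxt_mem_S hx hy hS hmem, ?_⟩
    simp only [pvNxt, List.mem_cons, List.not_mem_nil, or_false] at hmem
    split_ifs at hmem <;> rcases hmem with h | h | h | h | h | h <;> subst h <;>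
      exact ⟨by first
              | exact dvd_zero _ | exact hgx | exact hda
              | exact dvd_add hda hdb
              | exact dvd_sub (dvd_add hda hdb) hgy,
             by first
              | exact dvd_zero _ | exact hgy | exact hdb
              | exact dvd_add hda hdb
              | exact dvd_sub (dvd_add hda hdb) hgx⟩

-- constructions: pouring jug x down into jug y repeatedly
-- single BFS moves, as membership in pvNxt
lemma pvMem_fill_x {x y : Int} (s : Int × Int) : (x, s.2) ∈ pvNxt x y s := by
  simp [pvNxt]

lemma pvMem_fill_y {x y : Int} (s : Int × Int) : (s.1, y) ∈ pvNxt x y s := by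
  simp [pvNxt]

lemma pvMem_drop_y {x y : Int} (s : Int × Int) : (s.1, 0) ∈ pvNxt x y s := by
  simp [pvNxt]

lemma pvMem_pour_lt {x y : Int} {s : Int × Int} (h : s.1 + s.2 < y) :
    (0, s.1 + s.2) ∈ pvNxt x y s := by
  simp only [pvNxt, List.mem_cons]
  right; right; right; right; left
  rw [if_pos h]

lemma pvMem_pour_ge {x y : Int} {s : Int × Int} (h : ¬ s.1 + s.2 < y) :
    (s.1 + s.2 - y, y) ∈ pvNxt x y s := by
  simp only [pvNxt, List.mem_cons]
  right; right; right; right; left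
  rw [if_neg h]

lemma pvPourDown {x y : Int} (hy : 0 < y) :
    ∀ (n : Nat) (a : Int), a.toNat = n → 0 ≤ a → pvReach x y (a, 0) →
    pvReach x y (0, a % y) := by
  intro n
  induction n using Nat.strong_induction_on with
  | _ n ih =>
    intro a hn ha hr
    by_cases hlt : a < y
    · rw [Int.emod_eq_of_lt ha hlt]
      have hmem : ((0 : Int), a) ∈ pvNxt x y (a, 0) := by
        have := pvMem_pour_lt (x := x) (y := y) (s := (a, 0)) (by simpa using hlt)
        simpa using this
      exact pvReach.step hr hmem
    · have h1 : ((a : Int) + 0 - y, y) ∈ pvNxt x y (a, 0) :=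
        pvMem_pour_ge (by simpa using hlt)
      have r1 := pvReach.step hr h1
      have h2 : ((a : Int) + 0 - y, 0) ∈ pvNxt x y (a + 0 - y, y) :=
        pvMem_drop_y _
      have r2 := pvReach.step r1 h2
      have r2' : pvReach x y (a - y, 0) := by simpa using r2
      have r3 := ih (a - y).toNat (by omega) (a - y) rfl (by omega) r2'
      rwa [Int.sub_emod_right] at r3

lemma pvReach_multiples {x y : Int} (hx : 0 ≤ x) (hy : 0 < y) :
    ∀ k : Nat, pvReach x y (0, (↑k * x) % y) := by
  intro k
  induction k with
  | zero => simpa using pvReach.init (x := x) (y := y)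
  | succ k ih =>
    set m := ((k : Int) * x) % y with hm
    have hm0 : 0 ≤ m := Int.emod_nonneg _ (by omega)
    have hmy : m < y := Int.emod_lt_of_pos _ hy
    have r1 : pvReach x y (x, m) := pvReach.step ih (pvMem_fill_x _)
    have heq : ((↑(k + 1) : Int) * x) % y = (x + m) % y := by
      have h1 : ((↑(k + 1) : Int) * x) = (k : Int) * x + x := by push_cast; ring
      rw [h1, ← Int.emod_add_emod, ← hm, Int.add_comm]
    by_cases hlt : x + m < y
    · have r2 := pvReach.step r1 (pvMem_pour_lt (s := (x, m)) hlt)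
      have : ((↑(k + 1) : Int) * x) % y = x + m := by
        rw [heq, Int.emod_eq_of_lt (by omega) hlt]
      rw [this]
      exact r2
    · have r2 := pvReach.step r1 (pvMem_pour_ge (s := (x, m)) hlt)
      have r3 := pvReach.step r2 (pvMem_drop_y (x := x) (y := y) (x + m - y, y))
      have r4 := pvPourDown hy _ (x + m - y) rfl (by omega) r3
      have : ((↑(k + 1) : Int) * x) % y = (x + m - y) % y := by
        rw [heq, Int.sub_emod_right]
      rw [this]
      exact r4

lemma pvExists_k {x y m : Int} (hy : 0 < y) (hm : 0 ≤ m) (hmy : m < y)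
    (hd : (↑(Int.gcd x y) : Int) ∣ m) : ∃ k : Nat, (↑k * x) % y = m := by
  obtain ⟨t, ht⟩ := hd
  have hb := Int.gcd_eq_gcd_ab x y
  set k0 := t * Int.gcdA x y with hk0
  have hmod : (k0 * x) % y = m := by
    have hrepr : k0 * x = m + y * (-(t * Int.gcdB x y)) := by
      rw [ht, hb]; ring
    rw [hrepr, Int.add_mul_emod_self_left, Int.emod_eq_of_lt hm hmy]
  refine ⟨(k0 % y).toNat, ?_⟩
  rw [Int.toNat_of_nonneg (Int.emod_nonneg _ (by omega))]
  rw [Int.mul_emod, Int.emod_emod_of_dvd _ dvd_rfl, ← Int.mul_emod, hmod]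

lemma pvNxt_swap {x y : Int} {s t : Int × Int} (h : t ∈ pvNxt y x s) :
    (t.2, t.1) ∈ pvNxt x y (s.2, s.1) := by
  obtain ⟨a, b⟩ := s
  obtain ⟨c, d⟩ := t
  simp only [pvNxt, List.mem_cons, List.not_mem_nil, or_false, Prod.mk.injEq] at h ⊢
  have hcomm : b + a = a + b := by ring
  rw [hcomm]
  split_ifs at h ⊢ <;> simp only [Prod.mk.injEq] at h ⊢ <;> tauto

lemma pvReach_swap {x y : Int} {s : Int × Int} (h : pvReach y x s) :
    pvReach x y (s.2, s.1) := by
  induction h with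
  | init => exact pvReach.init
  | step _ hmem ih => exact pvReach.step ih (pvNxt_swap hmem)

-- existence of a reachable goal state under the gcd condition
lemma pvExists_goal {x y z : Int} (hx : 0 ≤ x) (hy : 0 ≤ y) (hz0 : 0 ≤ z)
    (hzxy : z ≤ x + y) (hd : (↑(Int.gcd x y) : Int) ∣ z) :
    ∃ s, pvReach x y s ∧ pvGoal z s := by
  by_cases hzy : z < y
  · obtain ⟨k, hk⟩ := pvExists_k (x := x) (hy := by omega) hz0 hzy hd
    exact ⟨(0, z), hk ▸ pvReach_multiples hx (by omega) k, Or.inr (Or.inl rfl)⟩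
  by_cases hzx : z < x
  · have hd' : (↑(Int.gcd y x) : Int) ∣ z := by rwa [Int.gcd_comm]
    obtain ⟨k, hk⟩ := pvExists_k (x := y) (hy := by omega) hz0 hzx hd'
    have hr : pvReach y x (0, z) := hk ▸ pvReach_multiples hy (by omega) k
    exact ⟨(z, 0), pvReach_swap hr, Or.inl rfl⟩
  · -- x ≤ z and y ≤ z: reach (x, z - x), whose total is z
    have hm0 : 0 ≤ z - x := by omega
    have hmy : z - x ≤ y := by omega
    by_cases hlt : z - x < y
    · have hy0 : 0 < y := by omega
      have hdm : (↑(Int.gcd x y) : Int) ∣ z - x := dvd_sub hd (Int.gcd_dvd_left _ _)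
      obtain ⟨k, hk⟩ := pvExists_k (x := x) hy0 hm0 hlt hdm
      have hr : pvReach x y (0, z - x) := hk ▸ pvReach_multiples hx hy0 k
      refine ⟨(x, z - x), pvReach.step hr (pvMem_fill_x _), Or.inr (Or.inr (by omega))⟩
    · -- z = x + y: fill both jugs
      have hr1 : pvReach x y (0, y) := pvReach.step pvReach.init (pvMem_fill_y _)
      have hr2 : pvReach x y (x, y) := pvReach.step hr1 (pvMem_fill_x _)
      exact ⟨(x, y), hr2, Or.inr (Or.inr (by omega))⟩

-- the BFS answer is exactly the gcd condition
lemma pvBfs_eq_gcd {x y z : Int} (hx : 0 ≤ x) (hy : 0 ≤ y) (hz0 : 0 ≤ z)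
    (hzxy : z ≤ x + y) :
    pvBfs x y z (((x + 1) * (y + 1)).toNat + 1) [(0, 0)] (PySem.Set.ofList [(0, 0)])
      = decide ((↑(Int.gcd x y) : Int) ∣ z) := by
  have hvis0 : PySem.Set.ofList [((0 : Int), (0 : Int))] = [(0, 0)] := by decide
  rw [hvis0]
  by_cases hd : (↑(Int.gcd x y) : Int) ∣ z
  · rw [decide_eq_true hd]
    cases hb : pvBfs x y z (((x + 1) * (y + 1)).toNat + 1) [(0, 0)] [(0, 0)] with
    | true => rfl
    | false =>
      exfalso
      have hnone := pvBfs_false (z := z) hx hy _ [(0, 0)] [(0, 0)] ?_ ?_ ?_ ?_ ?_ hb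
      · obtain ⟨s, hr, hg⟩ := pvExists_goal hx hy hz0 hzxy hd
        exact hnone s hr hg
      · -- fuel bound
        have hcard : pvSlack x y [((0 : Int), (0 : Int))] ≤ (x.toNat + 1) * (y.toNat + 1) := by
          calc pvSlack x y [((0 : Int), (0 : Int))]
              ≤ (pvS x y).card := Finset.card_filter_le _ _
            _ ≤ (Finset.range (x.toNat + 1) ×ˢ Finset.range (y.toNat + 1)).card :=
                Finset.card_image_le
            _ = (x.toNat + 1) * (y.toNat + 1) := by
                rw [Finset.card_product, Finset.card_range, Finset.card_range]
        have htn : ((x + 1) * (y + 1)).toNat = (x.toNat + 1) * (y.toNat + 1) := by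
          rw [Int.toNat_mul (by omega) (by omega)]
          have e1 : (x + 1).toNat = x.toNat + 1 := by omega
          have e2 : (y + 1).toNat = y.toNat + 1 := by omega
          rw [e1, e2]
        simp only [List.length_cons, List.length_nil]
        omega
      · simp
      · intro s hs; simpa using hs
      · intro s hs
        simp only [List.mem_singleton] at hs
        subst hs
        exact (pvS_mem hx hy).mpr (by simp [hx, hy])
      · intro s hs hnq
        simp only [List.mem_singleton] at hs
        exact absurd (by simp [hs]) hnq
  · cases hb : pvBfs x y z (((x + 1) * (y + 1)).toNat + 1) [(0, 0)] [(0, 0)] with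
    | false => simp [hd]
    | true =>
      exfalso
      obtain ⟨s, hr, hg⟩ := pvBfs_true _ [(0, 0)] [(0, 0)]
        (by intro s hs; simp only [List.mem_singleton] at hs; subst hs; exact pvReach.init) hb
      obtain ⟨-, hda, hdb⟩ := pvReach_inv hx hy hr
      rcases hg with h | h | h
      · exact hd (h ▸ hda)
      · exact hd (h ▸ hdb)
      · exact hd (h ▸ dvd_add hda hdb)

-- ===== VERDICT (by name: the statement is the Claim_ definition above) =====
theorem canMeasureWater2_spec : Claim_equal_canMeasureWater2 := by
  intro x y z _ hpre
  unfold Spec_canMeasureWater2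
  by_cases hc : z < 0 ∨ x + y < z
  · rw [canMeasureWater2, if_pos hc]
    have h1 : (decide (0 ≤ z) && decide (z ≤ x + y)) = false := by
      rcases hc with h | h <;> simp <;> omega
    simp [canMeasureWater2_alt, h1]
  · have h0z : 0 ≤ z := by omega
    have hzxy : z ≤ x + y := by omega
    obtain ⟨hx, hy⟩ : 0 ≤ x ∧ 0 ≤ y := by
      rcases hpre with h | h | h
      · exact h
      · omega
      · omega
    rw [canMeasureWater2, if_neg hc, pvBfs_eq_gcd hx hy h0z hzxy]
    by_cases hg0 : ((Int.gcd x y : Int)) = 0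
    · simp only [canMeasureWater2_alt, hg0]
      simp [h0z, hzxy, zero_dvd_iff]
    · simp only [canMeasureWater2_alt, if_neg hg0]
      simp [h0z, hzxy, PySem.Int.mod_eq_zero_iff_dvd]
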